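-- pv_equiv track=rewrite | github.com/abdelaalimouid/Gantry | agent.py | generate_snake_order
-- ===== SOURCE A (Python) =====
-- def generate_snake_order(total_width, total_height, tile_w, tile_h):
--     """Generates a zig-zag traversal order to maximize row/column reuse."""
--     cols = total_width // tile_w
--     rows = total_height // tile_h
--     order = []
--     for r in range(rows):
--         row_indices = [r * cols + c for c in range(cols)]
--         if r % 2 == 1:  # Flip every other row
--             row_indices.reverse()
--         order.extend(row_indices)
--     return order
-- ===== SOURCE B (Python) =====
-- def generate_snake_order(total_width, total_height, tile_w, tile_h):
--     """Generates a zig-zag traversal order to maximize row/column reuse."""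
--     cols = total_width // tile_w
--     rows = total_height // tile_h
--     n = rows * cols if rows > 0 and cols > 0 else 0
--     out = []
--     for i in range(n):
--         r, c = divmod(i, cols)
--         out.append(r * cols + (c if r % 2 == 0 else cols - 1 - c))
--     return out
-- ===== Notes on version B (the rewrite author's own statement) =====
-- stated objective: alternative
-- what changed: Replaces the per-row list building + in-place reverse + extend with a single flat pass over range(rows*cols) that computes each index directly via divmod, emitting forward or mirrored positions arithmetically; no intermediate row lists and no reversal.
import Mathlib
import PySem

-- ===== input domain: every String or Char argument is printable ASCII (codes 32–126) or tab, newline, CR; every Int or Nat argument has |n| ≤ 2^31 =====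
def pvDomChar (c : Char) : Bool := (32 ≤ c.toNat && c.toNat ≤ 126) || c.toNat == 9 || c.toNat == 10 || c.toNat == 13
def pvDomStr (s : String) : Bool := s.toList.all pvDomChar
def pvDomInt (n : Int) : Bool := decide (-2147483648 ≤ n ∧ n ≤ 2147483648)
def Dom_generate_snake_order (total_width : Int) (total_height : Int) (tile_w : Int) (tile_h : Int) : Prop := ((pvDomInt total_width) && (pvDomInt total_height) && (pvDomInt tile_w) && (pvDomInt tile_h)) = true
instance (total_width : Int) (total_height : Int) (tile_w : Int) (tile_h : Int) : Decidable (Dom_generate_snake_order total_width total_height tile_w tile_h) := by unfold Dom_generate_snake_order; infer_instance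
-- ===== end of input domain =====

-- B replaces the per-row build/reverse/extend loop with one flat pass computing each index by divmod (alternative decomposition, same cost).


-- ===== PORT A =====
def generate_snake_order (total_width : Int) (total_height : Int) (tile_w : Int) (tile_h : Int) : List Int :=
  let cols := PySem.Int.floordiv total_width tile_w
  let rows := PySem.Int.floordiv total_height tile_h
  (PySem.List.pyRange 0 rows 1).foldl (fun order r =>
    let row_indices := (PySem.List.pyRange 0 cols 1).map (fun c => r * cols + c)
    let row_indices := if PySem.Int.mod r 2 == 1 then row_indices.reverse else row_indices
    order ++ row_indices) []

-- ===== PORT B =====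
def generate_snake_order_alt (total_width : Int) (total_height : Int) (tile_w : Int) (tile_h : Int) : List Int :=
  let cols := PySem.Int.floordiv total_width tile_w
  let rows := PySem.Int.floordiv total_height tile_h
  let n := if 0 < rows ∧ 0 < cols then rows * cols else 0
  (PySem.List.pyRange 0 n 1).foldl (fun out i =>
    let r := PySem.Int.floordiv i cols
    let c := PySem.Int.mod i cols
    out ++ [r * cols + (if PySem.Int.mod r 2 == 0 then c else cols - 1 - c)]) []

-- ===== PRECONDITION & SPEC =====
-- Pre_ excludes exactly tile_w = 0 or tile_h = 0, where Python A raises ZeroDivisionError.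
def Pre_generate_snake_order (total_width : Int) (total_height : Int) (tile_w : Int) (tile_h : Int) : Prop := tile_w ≠ 0 ∧ tile_h ≠ 0
instance (total_width : Int) (total_height : Int) (tile_w : Int) (tile_h : Int) : Decidable (Pre_generate_snake_order total_width total_height tile_w tile_h) := by unfold Pre_generate_snake_order; infer_instance
def pvWitness_generate_snake_order : Int × Int × Int × Int := (7, 5, 2, 2)
def Spec_generate_snake_order (total_width : Int) (total_height : Int) (tile_w : Int) (tile_h : Int) (out : List Int) : Prop := out = generate_snake_order_alt total_width total_height tile_w tile_h
instance (total_width : Int) (total_height : Int) (tile_w : Int) (tile_h : Int) (out : List Int) : Decidable (Spec_generate_snake_order total_width total_height tile_w tile_h out) := by unfold Spec_generate_snake_order; infer_instance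

-- ===== CLAIM (what is proved, stated in full; the proofs are below) =====
def Claim_equal_generate_snake_order : Prop := ∀ (total_width : Int) (total_height : Int) (tile_w : Int) (tile_h : Int), Dom_generate_snake_order total_width total_height tile_w tile_h → Pre_generate_snake_order total_width total_height tile_w tile_h → Spec_generate_snake_order total_width total_height tile_w tile_h (generate_snake_order total_width total_height tile_w tile_h)

-- ===== LEMMAS AND PROOFS =====

-- A's loop body as a row-producing function (the extend argument).
def pvRow (cols r : Int) : List Int :=
  if PySem.Int.mod r 2 == 1 then ((PySem.List.pyRange 0 cols 1).map (fun c => r * cols + c)).reverse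
  else (PySem.List.pyRange 0 cols 1).map (fun c => r * cols + c)

-- B's per-cell emitter.
def pvEmit (cols i : Int) : Int :=
  (PySem.Int.floordiv i cols) * cols +
    (if PySem.Int.mod (PySem.Int.floordiv i cols) 2 == 0 then PySem.Int.mod i cols
     else cols - 1 - PySem.Int.mod i cols)

lemma pvEmit_eq (C : ℕ) (hC : 0 < C) (R k : ℕ) (hk : k < C) :
    pvEmit (C : Int) ((R : Int) * C + k) =
      (R : Int) * C + (if R % 2 = 0 then (k : Int) else (C : Int) - 1 - k) := by
  have hCpos : (0:Int) < (C:Int) := by exact_mod_cast hC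
  have hdiv : PySem.Int.floordiv ((R : Int) * C + k) C = (R : Int) := by
    rw [PySem.Int.floordiv_eq_ediv_of_pos hCpos]
    rw [add_comm, Int.add_mul_ediv_right _ _ (by omega : (C:Int) ≠ 0)]
    rw [Int.ediv_eq_zero_of_lt (by positivity) (by exact_mod_cast hk)]
    omega
  have hmod : PySem.Int.mod ((R : Int) * C + k) C = (k : Int) := by
    rw [PySem.Int.mod_eq_emod_of_pos hCpos, add_comm, Int.add_mul_emod_self_right]
    exact Int.emod_eq_of_lt (by positivity) (by exact_mod_cast hk)
  have hmod2 : PySem.Int.mod (R : Int) 2 = ((R % 2 : ℕ) : Int) := by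
    rw [PySem.Int.mod_eq_emod_of_pos (by norm_num)]
    exact (Int.natCast_mod R 2).symm
  unfold pvEmit
  rw [hdiv, hmod, hmod2]
  by_cases hpar : R % 2 = 0
  · simp [hpar]
  · have h1 : R % 2 = 1 := by omega
    simp [h1, hpar]

lemma pvRow_eq (C : ℕ) (hC : 0 < C) (R : ℕ) :
    (PySem.List.pyRange ((R:Int) * C) ((R:Int) * C + C) 1).map (pvEmit (C:Int)) = pvRow (C:Int) (R:Int) := by
  have hR : PySem.List.pyRange ((R:Int)*C) ((R:Int)*C + C) 1
      = (List.range C).map (fun k : ℕ => (R:Int)*C + (k:Int)) := by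
    rw [PySem.List.pyRange_one, show (R:Int)*C + C - ((R:Int)*C) = (C:Int) by ring, Int.toNat_natCast]
  have hF : PySem.List.pyRange 0 (C:Int) 1 = (List.range C).map (fun k : ℕ => ((k:Int))) := by
    rw [PySem.List.pyRange_one, show (C:Int) - 0 = (C:Int) by ring, Int.toNat_natCast]
    exact List.map_congr_left (fun k _ => by ring)
  have hmod2 : PySem.Int.mod (R : Int) 2 = ((R % 2 : ℕ) : Int) := by
    rw [PySem.Int.mod_eq_emod_of_pos (by norm_num)]
    exact (Int.natCast_mod R 2).symm
  rw [hR, List.map_map]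
  have hmap : (List.range C).map (pvEmit (C:Int) ∘ fun k : ℕ => (R:Int)*C + (k:Int))
      = (List.range C).map (fun k : ℕ => (R:Int)*C + (if R % 2 = 0 then (k:Int) else (C:Int)-1-k)) :=
    List.map_congr_left (fun k hk => pvEmit_eq C hC R k (List.mem_range.mp hk))
  rw [hmap]
  unfold pvRow
  rw [hF, List.map_map, hmod2]
  by_cases hpar : R % 2 = 0
  · simp [hpar, Function.comp]
  · have h1 : R % 2 = 1 := by omega
    rw [h1]
    simp only [Nat.cast_one, beq_self_eq_true, if_true, hpar, if_false]
    apply List.ext_getElem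
    · simp
    · intro i h1' h2'
      have hiC : i < C := by simpa using h1'
      simp only [List.getElem_reverse, List.length_map, List.length_range,
        List.getElem_map, List.getElem_range, Function.comp]
      congr 1
      omega

lemma pvCore_pos (C : ℕ) (hC : 0 < C) (R : ℕ) :
    (PySem.List.pyRange 0 (R:Int) 1).flatMap (pvRow (C:Int)) =
      (PySem.List.pyRange 0 ((R:Int) * (C:Int)) 1).map (pvEmit (C:Int)) := by
  induction R with
  | zero => simp [PySem.List.pyRange_one_eq_nil]
  | succ R ih =>
    push_cast
    rw [PySem.List.pyRange_one_succ_right (by positivity)]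
    rw [List.flatMap_append, ih]
    have hsplit : PySem.List.pyRange 0 (((R:Int)+1) * C) 1 =
        PySem.List.pyRange 0 ((R:Int) * C) 1 ++ PySem.List.pyRange ((R:Int) * C) (((R:Int)+1) * C) 1 := by
      apply PySem.List.pyRange_one_append
      · positivity
      · nlinarith [Int.natCast_pos.mpr hC]
    rw [hsplit, List.map_append]
    congr 1
    rw [show ((R:Int)+1) * C = (R:Int) * C + C by ring]
    simpa using (pvRow_eq C hC R).symm

lemma pvCore (rows cols : Int) :
    (PySem.List.pyRange 0 rows 1).flatMap (pvRow cols) =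
      (PySem.List.pyRange 0 (if 0 < rows ∧ 0 < cols then rows * cols else 0) 1).map (pvEmit cols) := by
  by_cases h : 0 < rows ∧ 0 < cols
  · rw [if_pos h]
    obtain ⟨hr, hc⟩ := h
    obtain ⟨R, rfl⟩ : ∃ R : ℕ, rows = (R:Int) := ⟨rows.toNat, by omega⟩
    obtain ⟨C, rfl⟩ : ∃ C : ℕ, cols = (C:Int) := ⟨cols.toNat, by omega⟩
    exact pvCore_pos C (by exact_mod_cast hc) R
  · rw [if_neg h]
    rw [PySem.List.pyRange_one_eq_nil (le_refl (0:Int)), List.map_nil]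
    rcases not_and_or.mp h with hr | hc
    · rw [PySem.List.pyRange_one_eq_nil (by omega : rows ≤ (0:Int))]; simp
    · have hnil : PySem.List.pyRange 0 cols 1 = [] := PySem.List.pyRange_one_eq_nil (by omega : cols ≤ (0:Int))
      simp [pvRow, hnil, List.flatMap]

-- ===== VERDICT (by name: the statement is the Claim_ definition above) =====
theorem generate_snake_order_spec : Claim_equal_generate_snake_order := by
  intro tw th w h _ _
  unfold Spec_generate_snake_order generate_snake_order generate_snake_order_alt
  show (PySem.List.pyRange 0 (PySem.Int.floordiv th h) 1).foldl
      (fun order r => order ++ pvRow (PySem.Int.floordiv tw w) r) []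
    = (PySem.List.pyRange 0 (if 0 < PySem.Int.floordiv th h ∧ 0 < PySem.Int.floordiv tw w then PySem.Int.floordiv th h * PySem.Int.floordiv tw w else 0) 1).foldl
      (fun out i => out ++ [pvEmit (PySem.Int.floordiv tw w) i]) []
  rw [PySem.List.foldl_append_eq_flatMap, PySem.List.foldl_append_singleton_eq_map]
  simp only [List.nil_append]
  exact pvCore (PySem.Int.floordiv th h) (PySem.Int.floordiv tw w)
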